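-- pv_equiv track=rewrite | github.com/pypi-data/pypi-mirror-362 | packages/repositorytest/repositorytest-0.4.6-py3-none-any.whl/repotest/core/base.py | _get_gold_patch
-- ===== SOURCE A (Python) =====
-- def _get_gold_patch(git_diff: str) -> str:
--     """
--     Extract non-test-related changes from the git diff.
--
--     Parameters
--     ----------
--         git_diff: The full git diff string
--
--     Returns
--     -------
--         A diff string containing only non-test files
--     """
--     other_patches = []
--     current_patch = []
--     in_patch = False
--     is_test_file = False
--
--     for line in git_diff.splitlines(keepends=True):
--         if line.startswith("diff --git"):
--             # Process the previous patch if we were in one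
--             if in_patch and not is_test_file:
--                 other_patches.extend(current_patch)
--
--             # Reset for new patch
--             current_patch = [line]
--             in_patch = True
--             is_test_file = False
--
--             # Check if this is a test file
--             if "test/" in line or "tests/" in line or "_test.py" in line or "test_" in line:
--                 is_test_file = True
--         elif in_patch:
--             current_patch.append(line)
--
--     # Add the last patch if it wasn't a test file
--     if in_patch and not is_test_file:
--         other_patches.extend(current_patch)
--
--     return "".join(other_patches)
-- ===== SOURCE B (Python) =====
-- def _is_test_header(line):
--     return ("test/" in line or "tests/" in line
--             or "_test.py" in line or "test_" in line)
--
--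
-- def _blocks(lines):
--     """lines[0] (if any) is a 'diff --git' header; split into header-led blocks."""
--     if not lines:
--         return []
--     k = 1
--     while k < len(lines) and not lines[k].startswith("diff --git"):
--         k += 1
--     return [lines[:k]] + _blocks(lines[k:])
--
--
-- def _get_gold_patch(git_diff: str) -> str:
--     lines = git_diff.splitlines(keepends=True)
--     i = 0
--     while i < len(lines) and not lines[i].startswith("diff --git"):
--         i += 1
--     blocks = _blocks(lines[i:])
--     good = [b for b in blocks if not _is_test_header(b[0])]
--     return "".join(line for b in good for line in b)
-- ===== Notes on version B (the rewrite author's own statement) =====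
-- stated objective: simpler
-- what changed: Replaces A's single-pass state machine (in_patch/is_test_file flags with flush-on-next-header and a trailing flush) by a group-then-filter pipeline: drop the prelude, cut the lines into header-led blocks, filter out blocks whose header matches a test pattern, concatenate.
import Mathlib
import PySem

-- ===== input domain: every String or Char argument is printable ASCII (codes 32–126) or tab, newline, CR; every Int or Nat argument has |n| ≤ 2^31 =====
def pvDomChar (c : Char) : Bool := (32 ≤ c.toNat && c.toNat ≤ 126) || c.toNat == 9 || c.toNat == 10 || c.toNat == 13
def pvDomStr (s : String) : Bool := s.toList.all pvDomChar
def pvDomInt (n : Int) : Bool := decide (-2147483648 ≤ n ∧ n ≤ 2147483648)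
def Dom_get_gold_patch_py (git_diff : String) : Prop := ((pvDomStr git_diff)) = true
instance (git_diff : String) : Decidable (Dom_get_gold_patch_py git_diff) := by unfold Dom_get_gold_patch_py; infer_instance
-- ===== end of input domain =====

-- B regroups A's interleaved state machine as: drop the prelude, cut the lines into
-- header-led blocks, filter out test blocks, concatenate (objective: simpler decomposition).

-- Hand port of str.splitlines(keepends=True) (PySem.Str.splitlines drops the ends):
-- exact for the boundaries \n, \r, \r\n — the only line boundaries occurring in Dom's
-- character set; shared by both ports since both Pythons call the same builtin.
def pvSplitlinesKeep : List Char → List Char → List (List Char)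
  | [], acc => if acc = [] then [] else [acc.reverse]
  | '\r' :: '\n' :: rest, acc => (acc.reverse ++ ['\r', '\n']) :: pvSplitlinesKeep rest []
  | '\r' :: rest, acc => (acc.reverse ++ ['\r']) :: pvSplitlinesKeep rest []
  | '\n' :: rest, acc => (acc.reverse ++ ['\n']) :: pvSplitlinesKeep rest []
  | c :: rest, acc => pvSplitlinesKeep rest (c :: acc)

-- ===== PORT A =====
-- A's loop state: (other_patches, current_patch, in_patch, is_test_file)
def pvStepA : (List (List Char) × List (List Char) × Bool × Bool) → List Char →
    (List (List Char) × List (List Char) × Bool × Bool)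
  | (other, current, in_patch, is_test), line =>
    if PySem.Chars.startswith line "diff --git".toList then
      ((if in_patch && !is_test then other ++ current else other), [line], true,
        PySem.Chars.isIn "test/".toList line || PySem.Chars.isIn "tests/".toList line ||
        PySem.Chars.isIn "_test.py".toList line || PySem.Chars.isIn "test_".toList line)
    else if in_patch then (other, current ++ [line], in_patch, is_test)
    else (other, current, in_patch, is_test)

def get_gold_patch_py (git_diff : String) : String :=
  match (pvSplitlinesKeep git_diff.toList []).foldl pvStepA ([], [], false, false) with
  | (other, current, in_patch, is_test) =>
    String.ofList (PySem.Chars.join []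
      (if in_patch && !is_test then other ++ current else other))

-- ===== PORT B =====
def pvIsTestHeader (line : List Char) : Bool :=
  PySem.Chars.isIn "test/".toList line || PySem.Chars.isIn "tests/".toList line ||
  PySem.Chars.isIn "_test.py".toList line || PySem.Chars.isIn "test_".toList line

def pvNotHeader (line : List Char) : Bool :=
  !PySem.Chars.startswith line "diff --git".toList

-- Source B's _blocks: the while-k scan is the takeWhile of the tail, lines[k:] its dropWhile
def pvBlocks : List (List Char) → List (List (List Char))
  | [] => []
  | l :: rest =>
      (l :: rest.takeWhile pvNotHeader) :: pvBlocks (rest.dropWhile pvNotHeader)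
  termination_by ls => ls.length
  decreasing_by
    simp only [List.length_cons]
    exact Nat.lt_succ_of_le (List.length_dropWhile_le _ _)

def get_gold_patch_py_alt (git_diff : String) : String :=
  let lines := pvSplitlinesKeep git_diff.toList []
  let start := lines.dropWhile pvNotHeader
  let good := (pvBlocks start).filter (fun b => !pvIsTestHeader (b.headD []))
  String.ofList (PySem.Chars.join [] good.flatten)

-- ===== PRECONDITION & SPEC =====
def Spec_get_gold_patch_py (git_diff : String) (out : String) : Prop := out = get_gold_patch_py_alt git_diff
instance (git_diff : String) (out : String) : Decidable (Spec_get_gold_patch_py git_diff out) := by unfold Spec_get_gold_patch_py; infer_instance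

-- ===== CLAIM (what is proved, stated in full; the proofs are below) =====
def Claim_equal_get_gold_patch_py : Prop := ∀ (git_diff : String), Dom_get_gold_patch_py git_diff → Spec_get_gold_patch_py git_diff (get_gold_patch_py git_diff)

-- ===== LEMMAS AND PROOFS =====

-- A's result before the final join, as a function of state and remaining lines
def pvRunA (s : List (List Char) × List (List Char) × Bool × Bool) (ls : List (List Char)) :
    List (List Char) :=
  match ls.foldl pvStepA s with
  | (other, current, in_patch, is_test) =>
    if in_patch && !is_test then other ++ current else other

-- B's result before the join, for a line list starting at a header (or empty)
def pvRunB (ls : List (List Char)) : List (List Char) :=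
  ((pvBlocks ls).filter (fun b => !pvIsTestHeader (b.headD []))).flatten

theorem pvRunA_nil (o c : List (List Char)) (p t : Bool) :
    pvRunA (o, c, p, t) [] = if p && !t then o ++ c else o := rfl

theorem pvRunA_cons (s : List (List Char) × List (List Char) × Bool × Bool)
    (l : List Char) (ls : List (List Char)) :
    pvRunA s (l :: ls) = pvRunA (pvStepA s l) ls := rfl

theorem pvStepA_nonheader (o c : List (List Char)) (t : Bool) (l : List Char)
    (h : pvNotHeader l = true) :
    pvStepA (o, c, true, t) l = (o, c ++ [l], true, t) := by
  have h' : PySem.Chars.startswith l ['d','i','f','f',' ','-','-','g','i','t'] = false := by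
    simpa [pvNotHeader] using h
  simp [pvStepA, h']

theorem pvStepA_header (o c : List (List Char)) (p t : Bool) (l : List Char)
    (h : pvNotHeader l = false) :
    pvStepA (o, c, p, t) l =
      ((if p && !t then o ++ c else o), [l], true, pvIsTestHeader l) := by
  have h' : PySem.Chars.startswith l ['d','i','f','f',' ','-','-','g','i','t'] = true := by
    simpa [pvNotHeader] using h
  simp [pvStepA, pvIsTestHeader, h']

theorem pvStepA_init_skip (l : List Char) (h : pvNotHeader l = true) :
    pvStepA ([], [], false, false) l = ([], [], false, false) := by
  have h' : PySem.Chars.startswith l ['d','i','f','f',' ','-','-','g','i','t'] = false := by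
    simpa [pvNotHeader] using h
  simp [pvStepA, h']

theorem pvRunB_nil : pvRunB [] = [] := by simp [pvRunB, pvBlocks]

theorem pvRunB_cons_header (l : List Char) (rest : List (List Char)) :
    pvRunB (l :: rest) =
      (if pvIsTestHeader l then [] else l :: rest.takeWhile pvNotHeader) ++
        pvRunB (rest.dropWhile pvNotHeader) := by
  simp only [pvRunB, pvBlocks, List.filter_cons]
  cases hT : pvIsTestHeader l <;> simp [hT]

-- main invariant: from an in-patch state, A's remainder is the pending block plus B's blocks
theorem pvRunA_inpatch (ls : List (List Char)) (o c : List (List Char)) (t : Bool) :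
    pvRunA (o, c, true, t) ls =
      o ++ (if t then [] else c ++ ls.takeWhile pvNotHeader) ++
        pvRunB (ls.dropWhile pvNotHeader) := by
  induction ls generalizing o c t with
  | nil =>
      rw [pvRunA_nil]
      cases t <;> simp [pvRunB_nil]
  | cons l rest ih =>
      rw [pvRunA_cons]
      cases h : pvNotHeader l
      · rw [pvStepA_header o c true t l h, ih, List.takeWhile_cons, List.dropWhile_cons, h]
        simp only [Bool.false_eq_true, if_false, Bool.true_and]
        rw [pvRunB_cons_header l rest]
        cases t <;> cases hT : pvIsTestHeader l <;> simp [hT]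
      · rw [pvStepA_nonheader o c t l h, ih, List.takeWhile_cons, List.dropWhile_cons, h]
        simp only [if_true]
        cases t <;> simp

theorem pvRunA_init (ls : List (List Char)) :
    pvRunA ([], [], false, false) ls = pvRunB (ls.dropWhile pvNotHeader) := by
  induction ls with
  | nil => rw [pvRunA_nil]; simp [pvRunB_nil]
  | cons l rest ih =>
      rw [pvRunA_cons]
      cases h : pvNotHeader l
      · rw [pvStepA_header [] [] false false l h, List.dropWhile_cons, h]
        simp only [Bool.false_eq_true, if_false, Bool.false_and]
        rw [pvRunA_inpatch rest [] [l] (pvIsTestHeader l), pvRunB_cons_header l rest]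

        cases hT : pvIsTestHeader l <;> simp [hT]
      · rw [pvStepA_init_skip l h, ih, List.dropWhile_cons, h]
        simp only [if_true]

-- ===== VERDICT (by name: the statement is the Claim_ definition above) =====
theorem get_gold_patch_py_spec : Claim_equal_get_gold_patch_py := by
  intro git_diff _
  unfold Spec_get_gold_patch_py get_gold_patch_py get_gold_patch_py_alt
  have := pvRunA_init (pvSplitlinesKeep git_diff.toList [])
  simp only [pvRunA, pvRunB] at this
  rcases hfold : (pvSplitlinesKeep git_diff.toList []).foldl pvStepA ([], [], false, false) with
    ⟨other, current, in_patch, is_test⟩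
  rw [hfold] at this
  simp only [this]
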